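-- pv_equiv track=rewrite | github.com/studykit/studykit-marketplace | plugins/workflow/scripts/workflow_cache.py | _looks_like_scalar_with_colon
-- ===== SOURCE A (Python) =====
-- def _looks_like_scalar_with_colon(text: str) -> bool:
--     quote: str | None = None
--     for index, char in enumerate(text):
--         if char in {'"', "'"}:
--             quote = char if quote is None else None if quote == char else quote
--         if char == ":" and quote is None:
--             return index + 1 < len(text) and not text[index + 1].isspace()
--     return False
-- ===== SOURCE B (Python) =====
-- def _looks_like_scalar_with_colon(text: str) -> bool:
--     i, n = 0, len(text)
--     while i < n:
--         c = text[i]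
--         if c == '"' or c == "'":
--             j = text.find(c, i + 1)
--             if j == -1:
--                 return False
--             i = j + 1
--         elif c == ":":
--             return i + 1 < n and not text[i + 1].isspace()
--         else:
--             i += 1
--     return False
-- ===== Notes on version B (the rewrite author's own statement) =====
-- stated objective: alternative
-- what changed: Replaces A's per-character quote-state machine (an Optional quote variable toggled on every quote character) with an index-based skip-ahead scanner that, on an opening quote, jumps directly past the matching quote via str.find and otherwise surfaces the first bare colon; no quote state is carried.
import Mathlib
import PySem

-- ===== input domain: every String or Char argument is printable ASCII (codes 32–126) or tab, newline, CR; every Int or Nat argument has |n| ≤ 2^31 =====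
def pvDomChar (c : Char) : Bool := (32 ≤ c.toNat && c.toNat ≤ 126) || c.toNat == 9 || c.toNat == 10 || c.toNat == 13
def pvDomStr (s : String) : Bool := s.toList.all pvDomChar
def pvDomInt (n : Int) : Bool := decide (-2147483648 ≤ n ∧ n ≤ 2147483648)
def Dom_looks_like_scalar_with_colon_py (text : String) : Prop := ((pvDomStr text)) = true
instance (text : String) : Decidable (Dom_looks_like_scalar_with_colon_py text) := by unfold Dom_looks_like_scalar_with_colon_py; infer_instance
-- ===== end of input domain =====

-- B replaces A's per-character quote-state toggle with a skip-ahead scanner that jumps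
-- over each quoted span via str.find, carrying no quote state (alternative decomposition); return value only.

-- ===== PORT A =====
-- the enumerate-loop of A, carrying the quote state; text[index+1] is the head of the rest
def pvAGo : Option Char → List Char → Bool
  | _, [] => false
  | quote, c :: rest =>
    let quote' : Option Char :=
      if c = '"' ∨ c = '\'' then
        (if quote = none then some c else if quote = some c then none else quote)
      else quote
    if c = ':' ∧ quote' = none then
      match rest with
      | [] => false
      | d :: _ => !(PySem.Chars.isspace d)
    else pvAGo quote' rest

def looks_like_scalar_with_colon_py (text : String) : Bool :=
  pvAGo none text.toList

-- ===== PORT B =====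
-- Source B's while-loop: on a quote, text.find(c, i+1) then resume after it (dropWhile + tail)
def pvAltGo : List Char → Bool
  | [] => false
  | c :: rest =>
    if c = '"' ∨ c = '\'' then
      match _h : rest.dropWhile (· != c) with
      | [] => false
      | _ :: t => pvAltGo t
    else if c = ':' then
      match rest with
      | [] => false
      | d :: _ => !(PySem.Chars.isspace d)
    else pvAltGo rest
termination_by l => l.length
decreasing_by
  · have h1 : (rest.dropWhile (· != c)).length ≤ rest.length :=
      (List.dropWhile_sublist _).length_le
    rw [_h] at h1
    simp at h1 ⊢
    omega
  · simp

def looks_like_scalar_with_colon_py_alt (text : String) : Bool :=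
  pvAltGo text.toList

-- ===== PRECONDITION & SPEC =====
def Spec_looks_like_scalar_with_colon_py (text : String) (out : Bool) : Prop := out = looks_like_scalar_with_colon_py_alt text
instance (text : String) (out : Bool) : Decidable (Spec_looks_like_scalar_with_colon_py text out) := by unfold Spec_looks_like_scalar_with_colon_py; infer_instance

-- ===== CLAIM (what is proved, stated in full; the proofs are below) =====
def Claim_equal_looks_like_scalar_with_colon_py : Prop := ∀ (text : String), Dom_looks_like_scalar_with_colon_py text → Spec_looks_like_scalar_with_colon_py text (looks_like_scalar_with_colon_py text)

-- ===== LEMMAS AND PROOFS =====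

lemma pvAltGo_nil : pvAltGo [] = false := by rw [pvAltGo.eq_def]

lemma pvAltGo_quote (c : Char) (rest : List Char) (hq : c = '"' ∨ c = '\'') :
    pvAltGo (c :: rest) =
      (match rest.dropWhile (· != c) with
       | [] => false
       | _ :: t => pvAltGo t) := by
  rw [pvAltGo.eq_def]
  simp only [hq, if_pos]
  split <;> rename_i heq <;> rw [heq]

lemma pvAltGo_colon (rest : List Char) :
    pvAltGo (':' :: rest) =
      (match rest with
       | [] => false
       | d :: _ => !(PySem.Chars.isspace d)) := by
  rw [pvAltGo.eq_def]
  simp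

lemma pvAltGo_other (c : Char) (rest : List Char) (hq : ¬(c = '"' ∨ c = '\'')) (hc : c ≠ ':') :
    pvAltGo (c :: rest) = pvAltGo rest := by
  rw [pvAltGo.eq_def]
  simp [hq, hc]

-- inside a quoted span, A's state machine just scans for the matching quote:
lemma pvAGo_some (c : Char) (hc : c = '"' ∨ c = '\'') :
    ∀ l : List Char, pvAGo (some c) l =
      (match l.dropWhile (· != c) with
       | [] => false
       | _ :: t => pvAGo none t) := by
  intro l
  induction l with
  | nil => simp [pvAGo]
  | cons x t ih =>
    by_cases hx : x = c
    · subst hx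
      have hq : x = '"' ∨ x = '\'' := hc
      have hxc : x ≠ ':' := by rcases hq with h | h <;> simp [h]
      simp [pvAGo, List.dropWhile, hq, hxc]
    · have hbne : (x != c) = true := by simp [hx]
      have hdrop : (x :: t).dropWhile (· != c) = t.dropWhile (· != c) := by
        simp [List.dropWhile, hbne]
      rw [hdrop, ← ih]
      by_cases hq : x = '"' ∨ x = '\''
      · have hxc : x ≠ ':' := by rcases hq with h | h <;> simp [h]
        have hcx : ¬ c = x := fun h => hx h.symm
        simp [pvAGo, hq, hxc, hcx]
      · simp [pvAGo, hq]

lemma pvAGo_none_eq_alt : ∀ l : List Char, pvAGo none l = pvAltGo l := by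
  have H : ∀ n, ∀ l : List Char, l.length ≤ n → pvAGo none l = pvAltGo l := by
    intro n
    induction n with
    | zero =>
      intro l h
      have : l = [] := List.length_eq_zero_iff.mp (Nat.le_zero.mp h)
      subst this; simp [pvAGo, pvAltGo_nil]
    | succ n ih =>
      intro l h
      match l with
      | [] => simp [pvAGo, pvAltGo_nil]
      | c :: rest =>
        by_cases hq : c = '"' ∨ c = '\''
        · have hxc : c ≠ ':' := by rcases hq with h' | h' <;> simp [h']
          have hA : pvAGo none (c :: rest) = pvAGo (some c) rest := by
            simp [pvAGo, hq, hxc]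
          rw [hA, pvAGo_some c hq rest, pvAltGo_quote c rest hq]
          have hdl : (rest.dropWhile (· != c)).length ≤ rest.length :=
            (List.dropWhile_sublist _).length_le
          match hd : rest.dropWhile (· != c) with
          | [] => simp
          | x :: t =>
            rw [hd] at hdl
            have ht : t.length ≤ n := by
              simp at h hdl; omega
            simp only []
            exact ih t ht
        · by_cases hcol : c = ':'
          · subst hcol
            rw [pvAltGo_colon]
            simp [pvAGo]
          · have h' : rest.length ≤ n := by simp at h; omega
            rw [pvAltGo_other c rest hq hcol]
            simp [pvAGo, hq, hcol, ih rest h']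
  intro l
  exact H l.length l le_rfl

-- ===== VERDICT (by name: the statement is the Claim_ definition above) =====
theorem looks_like_scalar_with_colon_py_spec : Claim_equal_looks_like_scalar_with_colon_py := by
  intro text _
  unfold Spec_looks_like_scalar_with_colon_py looks_like_scalar_with_colon_py looks_like_scalar_with_colon_py_alt
  exact pvAGo_none_eq_alt text.toList
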